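-- pv_equiv track=rewrite | github.com/jamespstrachan/hanabi | hanabibot.py | is_not_playable
-- ===== SOURCE A (Python) =====
-- def is_not_playable(playable_cards, colour=None, number=None):
--     """returns true if the provided number or colour proves the card can't be played"""
--     if colour and len([c for c in playable_cards if c[0] == colour]) == 0:
--         return True  # a known colour that's not in playable cards can't be played
--     if number and len([c for c in playable_cards if c[1] == number]) == 0:
--         return True  # a known number that's not in playable cards can't be played
--     if colour and number and (colour, number) not in playable_cards:
--         # if both colour and number are known, it can't be played unless playable_card
--         return True
--     return False
-- ===== SOURCE B (Python) =====
-- def is_not_playable(playable_cards, colour=None, number=None):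
--     """returns true if the provided number or colour proves the card can't be played"""
--     if not colour and not number:
--         return False
--     return not any((not colour or c[0] == colour) and (not number or c[1] == number)
--                    for c in playable_cards)
-- ===== Notes on version B (the rewrite author's own statement) =====
-- stated objective: simpler
-- what changed: Replaces A's three separate scans (colour filter, number filter, pair membership) with one guard plus a single any-pass over a fused predicate, using the fact that the both-known pair test subsumes the individual absence tests.
import Mathlib
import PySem

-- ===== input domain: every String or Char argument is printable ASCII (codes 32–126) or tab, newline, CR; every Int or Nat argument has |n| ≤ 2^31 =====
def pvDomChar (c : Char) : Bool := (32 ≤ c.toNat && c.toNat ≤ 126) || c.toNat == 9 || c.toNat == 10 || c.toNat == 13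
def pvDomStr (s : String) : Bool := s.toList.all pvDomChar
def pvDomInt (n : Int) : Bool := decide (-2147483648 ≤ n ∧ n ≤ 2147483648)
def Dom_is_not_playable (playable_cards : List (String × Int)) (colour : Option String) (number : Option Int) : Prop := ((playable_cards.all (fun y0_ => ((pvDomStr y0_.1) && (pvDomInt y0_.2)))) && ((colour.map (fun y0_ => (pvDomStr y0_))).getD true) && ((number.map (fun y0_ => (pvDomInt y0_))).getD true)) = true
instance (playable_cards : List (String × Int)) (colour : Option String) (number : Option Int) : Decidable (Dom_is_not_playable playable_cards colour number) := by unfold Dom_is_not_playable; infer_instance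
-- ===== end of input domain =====

-- B replaces A's three separate scans of playable_cards with one guard plus a single fused-predicate pass (objective: simpler); same return value on all inputs.


-- ===== PORT A =====
-- truthiness of the optional hints, as Python's `if colour:` / `if number:` see them
def pvTruthyC (colour : Option String) : Bool :=
  match colour with
  | some s => s != ""
  | none => false

def pvTruthyN (number : Option Int) : Bool :=
  match number with
  | some n => n != 0
  | none => false

def is_not_playable (playable_cards : List (String × Int)) (colour : Option String) (number : Option Int) : Bool :=
  if pvTruthyC colour && ((playable_cards.filter (fun c => some c.1 == colour)).length == 0) then
    true
  else if pvTruthyN number && ((playable_cards.filter (fun c => some c.2 == number)).length == 0) then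
    true
  else if pvTruthyC colour && pvTruthyN number
      && !(playable_cards.contains (colour.getD "", number.getD 0)) then
    true
  else
    false

-- ===== PORT B =====
-- B: one guard, then a single pass with a fused predicate
def is_not_playable_alt (playable_cards : List (String × Int)) (colour : Option String) (number : Option Int) : Bool :=
  if !pvTruthyC colour && !pvTruthyN number then
    false
  else
    !(playable_cards.any (fun c =>
        (!pvTruthyC colour || some c.1 == colour) && (!pvTruthyN number || some c.2 == number)))

-- ===== PRECONDITION & SPEC =====
def Spec_is_not_playable (playable_cards : List (String × Int)) (colour : Option String) (number : Option Int) (out : Bool) : Prop := out = is_not_playable_alt playable_cards colour number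
instance (playable_cards : List (String × Int)) (colour : Option String) (number : Option Int) (out : Bool) : Decidable (Spec_is_not_playable playable_cards colour number out) := by unfold Spec_is_not_playable; infer_instance

-- ===== CLAIM (what is proved, stated in full; the proofs are below) =====
def Claim_equal_is_not_playable : Prop := ∀ (playable_cards : List (String × Int)) (colour : Option String) (number : Option Int), Dom_is_not_playable playable_cards colour number → Spec_is_not_playable playable_cards colour number (is_not_playable playable_cards colour number)

-- ===== LEMMAS AND PROOFS =====
theorem filterLen_eq_zero {α : Type} (l : List α) (p : α → Bool) :
    (((l.filter p).length == 0) : Bool) = !(l.any p) := by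
  induction l with
  | nil => rfl
  | cons x xs ih =>
    by_cases h : p x = true <;> simp [List.any_cons, h, ih]


-- ===== VERDICT (by name: the statement is the Claim_ definition above) =====
theorem is_not_playable_spec : Claim_equal_is_not_playable := by
  intro pcs colour number _
  unfold Spec_is_not_playable is_not_playable is_not_playable_alt
  cases hc : pvTruthyC colour <;> cases hn : pvTruthyN number <;>
    simp [filterLen_eq_zero]
  rcases colour with _ | cv
  · simp [pvTruthyC] at hc
  rcases number with _ | nv
  · simp [pvTruthyN] at hn
  rw [Bool.eq_iff_iff]
  simp only [Bool.or_eq_true, Bool.not_eq_eq_eq_not, Bool.not_true, List.any_eq_false,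
    Bool.and_eq_true, beq_iff_eq, Option.some.injEq, decide_eq_false_iff_not, Option.getD_some,
    not_and]
  constructor
  · rintro (h | h | h) c hmem h1 h2
    · exact h c hmem h1
    · exact h c hmem h2
    · exact h (show (cv, nv) ∈ pcs by rw [← h1, ← h2]; exact hmem)
  · intro h
    right; right
    intro hmem
    exact h (cv, nv) hmem rfl rfl
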